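-- pv_equiv track=rewrite | github.com/HaRumiCoder/ege | 20012025/5.py | F
-- ===== SOURCE A (Python) =====
-- def F(N):
--     n = bin(N)[2:]
--     n = int(n[::-1])
--
--     res = 0
--     p = 0
--     for i in str(n)[::-1]:
--         res += int(i) * (2 ** p)
--         p += 1
--
--     return res
-- ===== SOURCE B (Python) =====
-- def F(N):
--     return int(bin(N)[2:][::-1], 2)
-- ===== Notes on version B (the rewrite author's own statement) =====
-- stated objective: simpler
-- what changed: B reverses the binary string of N once and parses it directly with int(..., 2), eliminating A's decimal round-trip (int of the reversed string as a decimal number, back to str) and A's manual power-of-two accumulation loop.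
import Mathlib
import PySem

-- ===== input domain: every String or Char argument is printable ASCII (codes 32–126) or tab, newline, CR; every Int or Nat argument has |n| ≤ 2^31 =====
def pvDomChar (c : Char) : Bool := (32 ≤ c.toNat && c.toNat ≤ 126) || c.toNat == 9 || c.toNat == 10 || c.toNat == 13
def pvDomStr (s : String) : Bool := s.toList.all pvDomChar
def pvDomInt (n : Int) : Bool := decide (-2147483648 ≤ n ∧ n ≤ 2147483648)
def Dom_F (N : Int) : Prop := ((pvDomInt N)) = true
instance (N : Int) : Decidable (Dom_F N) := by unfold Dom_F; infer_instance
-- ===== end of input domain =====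

-- B replaces A's decimal round-trip (int of the reversed binary string read as a DECIMAL number,
-- then str, then a manual power-of-two loop) by reversing bin(N)[2:] once and parsing it in base 2.

-- int(c) for a single ASCII digit character c ('0'-'9'); used by both ports.
def pvDigitVal (c : Char) : Int := (c.toNat : Int) - 48

-- int(s): ported BY HAND as an unsigned decimal-digit fold. Exact here because under Pre_F
-- (0 ≤ N) the argument bin(N)[2:][::-1] is a nonempty string of ASCII digits; for N < 0
-- Python's int raises ValueError (the string contains 'b') — those inputs are outside Pre_F.
def pvDecVal (cs : List Char) : Int := cs.foldl (fun a c => 10 * a + pvDigitVal c) 0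

-- ===== PORT A =====
def F (N : Int) : Int :=
  -- n = bin(N)[2:]
  let n1 : List Char := PySem.List.slice (PySem.Int.pyBin N).toList (some 2) none
  -- n = int(n[::-1])   (slice? is none only for step 0; step is -1 here)
  let n2 : Int := pvDecVal ((PySem.List.slice? n1 none none (-1)).getD [])
  -- res = 0; p = 0; for i in str(n)[::-1]: res += int(i) * (2 ** p); p += 1
  -- (2 ** p with the Int counter p ported as 2 ^ p.toNat; p here is always ≥ 0)
  let st := ((PySem.List.slice? (PySem.Int.toChars n2) none none (-1)).getD []).foldl
      (fun (s : Int × Int) c => (s.1 + pvDigitVal c * 2 ^ s.2.toNat, s.2 + 1)) (0, 0)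
  st.1

-- ===== PORT B =====
-- int(s, 2): ported BY HAND as an unsigned binary-digit fold. Exact here because under Pre_F
-- the argument bin(N)[2:][::-1] is a nonempty string of '0'/'1'; for N < 0 Python raises.
def pvBinVal (cs : List Char) : Int := cs.foldl (fun a c => 2 * a + pvDigitVal c) 0

def F_alt (N : Int) : Int :=
  -- int(bin(N)[2:][::-1], 2)
  pvBinVal ((PySem.List.slice?
      (PySem.List.slice (PySem.Int.pyBin N).toList (some 2) none) none none (-1)).getD [])

-- ===== PRECONDITION & SPEC =====
-- For N < 0 both Pythons raise ValueError (the reversed string still holds the 'b' of the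
-- '-0b' prefix), so Pre_F admits exactly the inputs on which A returns.
def Pre_F (N : Int) : Prop := 0 ≤ N
instance (N : Int) : Decidable (Pre_F N) := by unfold Pre_F; infer_instance

def pvWitness_F : Int := 6

def Spec_F (N : Int) (out : Int) : Prop := out = F_alt N
instance (N : Int) (out : Int) : Decidable (Spec_F N out) := by unfold Spec_F; infer_instance

-- ===== CLAIM (what is proved, stated in full; the proofs are below) =====
def Claim_equal_F : Prop := ∀ (N : Int), Dom_F N → Pre_F N → Spec_F N (F N)

-- ===== LEMMAS AND PROOFS =====

theorem pvDigitVal_digitChar {d : Nat} (h : d < 10) :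
    pvDigitVal (Nat.digitChar d) = (d : Int) := by
  interval_cases d <;> decide

-- Nat.toDigitsCore, with enough fuel, is the reversed little-endian digit list.
theorem pv_toDigitsCore_eq (b : Nat) (hb : 1 < b) :
    ∀ (f n : Nat) (ds : List Char), 0 < n → n ≤ f →
      Nat.toDigitsCore b f n ds = ((Nat.digits b n).map Nat.digitChar).reverse ++ ds := by
  intro f
  induction f with
  | zero => intro n ds hn hf; omega
  | succ f ih =>
    intro n ds hn hf
    rw [show Nat.toDigitsCore b (f+1) n ds =
        (if n / b = 0 then Nat.digitChar (n % b) :: ds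
         else Nat.toDigitsCore b f (n / b) (Nat.digitChar (n % b) :: ds)) from by
      simp only [Nat.toDigitsCore]]
    rw [Nat.digits_def' hb hn]
    by_cases h0 : n / b = 0
    · simp [h0]
    · have hpos : 0 < n / b := Nat.pos_of_ne_zero h0
      have hlt : n / b < n := Nat.div_lt_self hn hb
      rw [if_neg h0, ih (n / b) (Nat.digitChar (n % b) :: ds) hpos (by omega)]
      simp

theorem pv_toDigits_eq {b n : Nat} (hb : 1 < b) (hn : 0 < n) :
    Nat.toDigits b n = ((Nat.digits b n).map Nat.digitChar).reverse := by
  have : Nat.toDigits b n = Nat.toDigitsCore b (n + 1) n [] := by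
    simp [Nat.toDigits]
  rw [this, pv_toDigitsCore_eq b hb (n + 1) n [] hn (by omega), List.append_nil]

-- The MSB-first digit fold of a base-b literal written with Nat.digitChar.
theorem pv_fold_eq_ofDigits (b : Nat) :
    ∀ (L : List Nat) (a : Int), (∀ d ∈ L, d < 10) →
      (L.map Nat.digitChar).foldl (fun a c => (b : Int) * a + pvDigitVal c) a =
        a * (b : Int) ^ L.length + ((Nat.ofDigits b L.reverse : ℕ) : Int) := by
  intro L
  induction L with
  | nil => intro a _; simp
  | cons d L ih =>
    intro a hL
    have hd : d < 10 := hL d (by simp)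
    simp only [List.map_cons, List.foldl_cons, List.reverse_cons]
    rw [ih ((b : Int) * a + pvDigitVal (Nat.digitChar d)) (fun x hx => hL x (by simp [hx])),
        pvDigitVal_digitChar hd, Nat.ofDigits_append, Nat.ofDigits_singleton]
    simp only [List.length_cons, List.length_reverse]
    push_cast
    ring

-- A's accumulation loop over a little-endian digit-character list.
theorem pv_loop_eq_ofDigits :
    ∀ (L : List Nat) (r0 : Int) (p0 : Nat), (∀ d ∈ L, d < 10) →
      ((L.map Nat.digitChar).foldl
          (fun (s : Int × Int) c => (s.1 + pvDigitVal c * 2 ^ s.2.toNat, s.2 + 1))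
          (r0, (p0 : Int))).1
        = r0 + 2 ^ p0 * ((Nat.ofDigits 2 L : ℕ) : Int) := by
  intro L
  induction L with
  | nil => intro r0 p0 _; simp [Nat.ofDigits]
  | cons d L ih =>
    intro r0 p0 hL
    have hd : d < 10 := hL d (by simp)
    simp only [List.map_cons, List.foldl_cons]
    have hcast : ((p0 : Int) + 1) = ((p0 + 1 : Nat) : Int) := by push_cast; ring
    rw [hcast, ih (r0 + pvDigitVal (Nat.digitChar d) * 2 ^ ((p0 : Int)).toNat) (p0 + 1)
          (fun x hx => hL x (by simp [hx]))]
    rw [pvDigitVal_digitChar hd, Int.toNat_natCast, Nat.ofDigits_cons]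
    push_cast
    ring

theorem pv_ofDigits_eq_zero :
    ∀ (V : List Nat), Nat.ofDigits 10 V = 0 → Nat.ofDigits 2 V = 0 := by
  intro V
  induction V with
  | nil => intro _; simp [Nat.ofDigits]
  | cons d V ih =>
    intro h
    rw [Nat.ofDigits_cons] at h
    have hd : d = 0 ∧ Nat.ofDigits 10 V = 0 := by omega
    rw [Nat.ofDigits_cons, hd.1, ih hd.2]

-- The decimal round-trip does not change the base-2 reading of a digit list.
theorem pv_roundtrip :
    ∀ (V : List Nat), (∀ d ∈ V, d < 10) →
      Nat.ofDigits 2 (Nat.digits 10 (Nat.ofDigits 10 V)) = Nat.ofDigits 2 V := by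
  intro V
  induction V with
  | nil => simp
  | cons d V ih =>
    intro hV
    have hd : d < 10 := hV d (by simp)
    have hV' : ∀ x ∈ V, x < 10 := fun x hx => hV x (by simp [hx])
    rw [Nat.ofDigits_cons]
    by_cases h0 : d + 10 * Nat.ofDigits 10 V = 0
    · have hdz : d = 0 := by omega
      have hMz : Nat.ofDigits 10 V = 0 := by omega
      rw [h0]
      simp [Nat.ofDigits_cons, hdz, pv_ofDigits_eq_zero V hMz]
    · have hmod : (d + 10 * Nat.ofDigits 10 V) % 10 = d := by omega
      have hdiv : (d + 10 * Nat.ofDigits 10 V) / 10 = Nat.ofDigits 10 V := by omega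
      rw [Nat.digits_def' (by norm_num : (1:Nat) < 10) (Nat.pos_of_ne_zero h0), hmod, hdiv,
          Nat.ofDigits_cons, Nat.ofDigits_cons, ih hV']

-- bin(N)[2:][::-1] as a digit-character list, for 0 < N.
theorem pv_rev_eq {N : Int} (hN : 0 < N) :
    (PySem.List.slice? (PySem.List.slice (PySem.Int.pyBin N).toList (some 2) none)
        none none (-1)).getD []
      = (Nat.digits 2 N.toNat).map Nat.digitChar := by
  have hN0 : ¬ N < 0 := by omega
  have h2 : (some (2 : Int)) = (some ((2 : Nat) : Int)) := by norm_num
  rw [PySem.Int.toList_pyBin, PySem.Int.toBinChars0b, if_neg hN0, h2,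
      PySem.List.slice_from_natCast, PySem.List.slice?_none_none_neg_one]
  simp only [Option.getD_some, List.drop_succ_cons, List.drop_zero]
  rw [pv_toDigits_eq (by norm_num) (by omega : 0 < N.toNat), List.reverse_reverse]

theorem pv_digits_lt_ten (b n : Nat) (hb : 1 < b) (hb10 : b ≤ 10) :
    ∀ d ∈ Nat.digits b n, d < 10 :=
  fun _ hd => lt_of_lt_of_le (Nat.digits_lt_base hb hd) hb10

-- ===== VERDICT (by name: the statement is the Claim_ definition above) =====
theorem F_spec : Claim_equal_F := by
  intro N _ hPre
  unfold Spec_F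
  by_cases hz : N = 0
  · subst hz; decide
  · have hN : 0 < N := lt_of_le_of_ne hPre (Ne.symm hz)
    have hrev := pv_rev_eq hN
    set D : List Nat := Nat.digits 2 N.toNat with hD
    have hDlt : ∀ d ∈ D, d < 10 := pv_digits_lt_ten 2 N.toNat (by norm_num) (by norm_num)
    have hVlt : ∀ d ∈ D.reverse, d < 10 := by
      intro d hd; exact hDlt d (List.mem_reverse.mp hd)
    set M : Nat := Nat.ofDigits 10 D.reverse with hM
    -- B's value
    have hB : F_alt N = ((Nat.ofDigits 2 D.reverse : ℕ) : Int) := by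
      unfold F_alt pvBinVal
      rw [hrev]
      have := pv_fold_eq_ofDigits 2 D 0 hDlt
      simpa using this
    -- A's intermediate decimal number int(bin(N)[2:][::-1])
    have hm : pvDecVal ((PySem.List.slice?
        (PySem.List.slice (PySem.Int.pyBin N).toList (some 2) none) none none (-1)).getD [])
        = (M : Int) := by
      unfold pvDecVal
      rw [hrev, hM]
      have := pv_fold_eq_ofDigits 10 D 0 hDlt
      simpa using this
    -- A's value
    have hA : F N = ((Nat.ofDigits 2 (Nat.digits 10 M) : ℕ) : Int) := by
      show (((PySem.List.slice? (PySem.Int.toChars (pvDecVal ((PySem.List.slice?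
          (PySem.List.slice (PySem.Int.pyBin N).toList (some 2) none) none none (-1)).getD [])))
          none none (-1)).getD []).foldl
          (fun (s : Int × Int) c => (s.1 + pvDigitVal c * 2 ^ s.2.toNat, s.2 + 1)) (0, 0)).1 = _
      rw [hm]
      have hchars : PySem.Int.toChars (M : Int) = Nat.toDigits 10 M := by
        rw [PySem.Int.toChars, if_neg (by omega : ¬ ((M : Int) < 0)), Int.toNat_natCast]
      rw [hchars]
      by_cases hM0 : M = 0
      · rw [hM0, show Nat.toDigits 10 0 = ['0'] from by decide,
            PySem.List.slice?_none_none_neg_one]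
        simp only [Option.getD_some, List.reverse_singleton]
        have := pv_loop_eq_ofDigits [0] 0 0 (by intro d hd; simp at hd; omega)
        simpa [Nat.digitChar, Nat.ofDigits] using this
      · rw [pv_toDigits_eq (by norm_num) (Nat.pos_of_ne_zero hM0),
            PySem.List.slice?_none_none_neg_one]
        simp only [Option.getD_some, List.reverse_reverse]
        have := pv_loop_eq_ofDigits (Nat.digits 10 M) 0 0
          (pv_digits_lt_ten 10 M (by norm_num) (by norm_num))
        simpa using this
    rw [hA, hB, hM]
    exact_mod_cast congrArg (fun (k : ℕ) => (k : Int)) (pv_roundtrip D.reverse hVlt)
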